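-- pv_equiv track=rewrite | github.com/MisterKinn/formulite-landing | nova-ai/script_runner.py | _sanitize_multiline_strings
-- ===== SOURCE A (Python) =====
-- from typing import Callable, Dict, List
--
-- def _sanitize_multiline_strings(script: str) -> str:
--     out: List[str] = []
--     quote_char: str | None = None
--     escaped = False
--     for ch in script:
--         if escaped:
--             out.append(ch)
--             escaped = False
--             continue
--         if ch == "\\":
--             out.append(ch)
--             escaped = True
--             continue
--         if ch in ("'", '"'):
--             if quote_char is None:
--                 quote_char = ch
--             elif quote_char == ch:
--                 quote_char = None
--             out.append(ch)
--             continue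
--         if ch in ("\n", "\r", "\u2028", "\u2029") and quote_char is not None:
--             out.append(" ")
--             continue
--         out.append(ch)
--     if quote_char is not None:
--         out.append(quote_char)
--     return "".join(out)
-- ===== SOURCE B (Python) =====
-- def _sanitize_multiline_strings(script: str) -> str:
--     out = []
--     i = 0
--     n = len(script)
--     while i < n:
--         ch = script[i]
--         if ch == "\\":
--             out.append(ch)
--             if i + 1 < n:
--                 out.append(script[i + 1])
--             i += 2
--             continue
--         if ch in ("'", '"'):
--             q = ch
--             out.append(q)
--             i += 1
--             closed = False
--             while i < n:
--                 c = script[i]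
--                 if c == "\\":
--                     out.append(c)
--                     if i + 1 < n:
--                         out.append(script[i + 1])
--                     i += 2
--                     continue
--                 if c == q:
--                     out.append(c)
--                     i += 1
--                     closed = True
--                     break
--                 out.append(" " if c in ("\n", "\r", "\u2028", "\u2029") else c)
--                 i += 1
--             if not closed:
--                 out.append(q)
--             continue
--         out.append(ch)
--         i += 1
--     return "".join(out)
-- ===== Notes on version B (the rewrite author's own statement) =====
-- stated objective: alternative
-- what changed: A is a flat one-pass state machine over characters carrying escaped/quote_char flags; B is a two-level scanner whose outer loop walks code and, on an opening quote, hands control to an inner loop that consumes the whole string literal (handling escapes, replacing line separators by spaces, emitting the quote again if the literal is unterminated).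
import Mathlib
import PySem

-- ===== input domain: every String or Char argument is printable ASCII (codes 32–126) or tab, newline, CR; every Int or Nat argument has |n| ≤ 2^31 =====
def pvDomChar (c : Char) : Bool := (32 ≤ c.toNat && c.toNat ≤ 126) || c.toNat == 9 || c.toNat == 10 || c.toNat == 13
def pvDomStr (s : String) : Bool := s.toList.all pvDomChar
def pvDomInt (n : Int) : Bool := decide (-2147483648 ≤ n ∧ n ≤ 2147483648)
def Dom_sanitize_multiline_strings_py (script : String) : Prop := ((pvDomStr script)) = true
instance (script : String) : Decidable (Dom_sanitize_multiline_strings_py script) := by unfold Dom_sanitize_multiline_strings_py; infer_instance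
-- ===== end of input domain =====

-- B replaces A's flat single-char state machine (escaped/quote_char flags) by a two-level
-- scanner: an outer pass over code with an inner loop that consumes one string literal at a
-- time (objective: alternative decomposition, same cost).

-- ===== PORT A =====
-- one iteration of A's for-loop: state = (out, quote_char, escaped)
def aStep (st : List Char × Option Char × Bool) (ch : Char) : List Char × Option Char × Bool :=
  let (out, q, esc) := st
  if esc then (out ++ [ch], q, false)
  else if ch = '\\' then (out ++ [ch], q, true)
  else if ch = '\'' ∨ ch = '"' then
    let q' : Option Char :=
      match q with
      | none => some ch
      | some c => if c = ch then none else some c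
    (out ++ [ch], q', false)
  else if (ch = '\n' ∨ ch = '\r' ∨ ch = '\u2028' ∨ ch = '\u2029') ∧ q.isSome then
    (out ++ [' '], q, false)
  else (out ++ [ch], q, false)

def sanitize_multiline_strings_py (script : String) : String :=
  let st := script.toList.foldl aStep ([], none, false)
  let out :=
    match st.2.1 with
    | some c => st.1 ++ [c]
    | none => st.1
  String.mk out

-- ===== PORT B =====
-- inner loop of B: consumes a string literal opened with quote q;
-- returns (emitted chars after the opening quote, remaining input)
def bInner (q : Char) : List Char → List Char × List Char
  | [] => ([q], [])
  | c :: rest =>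
    if c = '\\' then
      match rest with
      | [] => ([c, q], [])
      | d :: rest' =>
        let (o, r) := bInner q rest'
        (c :: d :: o, r)
    else if c = q then ([c], rest)
    else if c = '\n' ∨ c = '\r' ∨ c = '\u2028' ∨ c = '\u2029' then
      let (o, r) := bInner q rest
      (' ' :: o, r)
    else
      let (o, r) := bInner q rest
      (c :: o, r)

-- termination helper for bOuter (cited by name in decreasing_by)
lemma bInner_rest_le (q : Char) (cs : List Char) : (bInner q cs).2.length ≤ cs.length := by
  fun_induction bInner q cs <;> simp_all <;> omega

-- outer loop of B
def bOuter : List Char → List Char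
  | [] => []
  | c :: rest =>
    if c = '\\' then
      match rest with
      | [] => [c]
      | d :: rest' => c :: d :: bOuter rest'
    else if c = '\'' ∨ c = '"' then
      c :: ((bInner c rest).1 ++ bOuter (bInner c rest).2)
    else c :: bOuter rest
termination_by cs => cs.length
decreasing_by
  all_goals simp
  have := bInner_rest_le c rest; omega

def sanitize_multiline_strings_py_alt (script : String) : String :=
  String.mk (bOuter script.toList)

-- ===== PRECONDITION & SPEC =====
def Spec_sanitize_multiline_strings_py (script : String) (out : String) : Prop := out = sanitize_multiline_strings_py_alt script
instance (script : String) (out : String) : Decidable (Spec_sanitize_multiline_strings_py script out) := by unfold Spec_sanitize_multiline_strings_py; infer_instance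

-- ===== CLAIM (what is proved, stated in full; the proofs are below) =====
def Claim_equal_sanitize_multiline_strings_py : Prop := ∀ (script : String), Dom_sanitize_multiline_strings_py script → Spec_sanitize_multiline_strings_py script (sanitize_multiline_strings_py script)

-- ===== LEMMAS AND PROOFS =====

-- unfolding lemmas for bOuter (a well-founded definition)
lemma bOuter_nil : bOuter [] = [] := by rw [bOuter.eq_def]
lemma bOuter_bs_nil : bOuter ['\\'] = ['\\'] := by rw [bOuter.eq_def]; simp
lemma bOuter_bs_cons (d : Char) (rest : List Char) :
    bOuter ('\\' :: d :: rest) = '\\' :: d :: bOuter rest := by rw [bOuter.eq_def]; simp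
lemma bOuter_quote (c : Char) (rest : List Char) (hb : c ≠ '\\') (hq : c = '\'' ∨ c = '"') :
    bOuter (c :: rest) = c :: ((bInner c rest).1 ++ bOuter (bInner c rest).2) := by
  rw [bOuter.eq_def]; simp [hb, hq]
lemma bOuter_other (c : Char) (rest : List Char) (hb : c ≠ '\\') (hq : ¬(c = '\'' ∨ c = '"')) :
    bOuter (c :: rest) = c :: bOuter rest := by
  rw [bOuter.eq_def]; simp [hb, hq]

-- append the pending quote of an unterminated literal, as A does after its loop
def aFinish (st : List Char × Option Char × Bool) : List Char :=
  match st.2.1 with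
  | some c => st.1 ++ [c]
  | none => st.1

-- unfolding lemmas for bInner
lemma bInner_nil (q : Char) : bInner q [] = ([q], []) := rfl
lemma bInner_bs_nil (q : Char) : bInner q ['\\'] = (['\\', q], []) := by simp [bInner]
lemma bInner_bs_cons (q d : Char) (rest : List Char) :
    bInner q ('\\' :: d :: rest) = ('\\' :: d :: (bInner q rest).1, (bInner q rest).2) := by
  simp [bInner]
lemma bInner_close (q c : Char) (rest : List Char) (hb : c ≠ '\\') (hc : c = q) :
    bInner q (c :: rest) = ([c], rest) := by subst hc; rw [bInner.eq_def]; simp [hb]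
lemma bInner_nl (q c : Char) (rest : List Char) (hb : c ≠ '\\') (hc : c ≠ q)
    (hnl : c = '\n' ∨ c = '\r' ∨ c = '\u2028' ∨ c = '\u2029') :
    bInner q (c :: rest) = (' ' :: (bInner q rest).1, (bInner q rest).2) := by
  rw [bInner.eq_def]; simp [hb, hc, hnl]
lemma bInner_other_ch (q c : Char) (rest : List Char) (hb : c ≠ '\\') (hc : c ≠ q)
    (hnl : ¬(c = '\n' ∨ c = '\r' ∨ c = '\u2028' ∨ c = '\u2029')) :
    bInner q (c :: rest) = (c :: (bInner q rest).1, (bInner q rest).2) := by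
  rw [bInner.eq_def]; simp [hb, hc, hnl]

-- combined invariant: A's fold from the outside-string state computes bOuter, and from the
-- inside-string state computes bInner followed by bOuter on the remaining input
lemma pv_main (n : Nat) :
    (∀ cs out, cs.length ≤ n →
      aFinish (cs.foldl aStep (out, none, false)) = out ++ bOuter cs)
  ∧ (∀ cs out qc, cs.length ≤ n → (qc = '\'' ∨ qc = '"') →
      aFinish (cs.foldl aStep (out, some qc, false)) =
        out ++ (bInner qc cs).1 ++ bOuter (bInner qc cs).2) := by
  induction n with
  | zero =>
    constructor
    · intro cs out h
      have : cs = [] := List.eq_nil_of_length_eq_zero (Nat.le_zero.mp h)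
      subst this; simp [aFinish, bOuter_nil]
    · intro cs out qc h hq
      have : cs = [] := List.eq_nil_of_length_eq_zero (Nat.le_zero.mp h)
      subst this; simp [aFinish, bInner, bOuter_nil]
  | succ n ih =>
    constructor
    · intro cs out h
      match cs with
      | [] => simp [aFinish, bOuter_nil]
      | c :: rest =>
        simp only [List.length_cons, Nat.succ_le_succ_iff] at h
        by_cases hb : c = '\\'
        · subst hb
          match rest with
          | [] => simp [aStep, aFinish, bOuter_bs_nil]
          | d :: rest' =>
            simp only [List.length_cons] at h
            have h' : rest'.length ≤ n := by omega
            have := ih.1 rest' (out ++ ['\\'] ++ [d]) h'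
            rw [bOuter_bs_cons]
            simp only [List.foldl_cons, aStep]
            simp only [aStep] at *
            simpa [aStep] using this
        · by_cases hqt : c = '\'' ∨ c = '"'
          · have := ih.2 rest (out ++ [c]) c h hqt
            rw [bOuter_quote c rest hb hqt]
            simp only [List.foldl_cons, aStep, if_neg hb, if_pos hqt]
            simpa using this
          · have := ih.1 rest (out ++ [c]) h
            rw [bOuter_other c rest hb hqt]
            simp only [List.foldl_cons, aStep, if_neg hb, if_neg hqt]
            simp only [Option.isSome_none, Bool.false_eq_true, and_false, if_neg,
              not_false_iff]
            simpa using this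
    · intro cs out qc h hq
      match cs with
      | [] => simp [aFinish, bInner_nil, bOuter_nil]
      | c :: rest =>
        simp only [List.length_cons, Nat.succ_le_succ_iff] at h
        by_cases hb : c = '\\'
        · subst hb
          match rest with
          | [] => simp [aStep, aFinish, bInner_bs_nil, bOuter_nil]
          | d :: rest' =>
            simp only [List.length_cons] at h
            have h' : rest'.length ≤ n := by omega
            have := ih.2 rest' (out ++ ['\\'] ++ [d]) qc h' hq
            rw [bInner_bs_cons]
            simp only [List.foldl_cons, aStep]
            simpa [aStep] using this
        · by_cases hc : c = qc
          · subst hc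
            have hqt : c = '\'' ∨ c = '"' := hq
            have := ih.1 rest (out ++ [c]) h
            rw [bInner_close c c rest hb rfl]
            simp only [List.foldl_cons, aStep, if_neg hb, if_pos hqt]
            simpa using this
          · by_cases hqt : c = '\'' ∨ c = '"'
            · -- the other quote char inside the literal: A keeps quote state, both append c
              have := ih.2 rest (out ++ [c]) qc h hq
              have hne : qc ≠ c := fun e => hc e.symm
              have hnlc : ¬ (c = '\n' ∨ c = '\r' ∨ c = '\u2028' ∨ c = '\u2029') := by
                rcases hqt with rfl | rfl <;> decide
              rw [bInner_other_ch qc c rest hb hc hnlc]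
              simp only [List.foldl_cons, aStep, if_neg hb, if_pos hqt, if_neg hne]
              simpa using this
            · by_cases hnl : c = '\n' ∨ c = '\r' ∨ c = '\u2028' ∨ c = '\u2029'
              · have := ih.2 rest (out ++ [' ']) qc h hq
                rw [bInner_nl qc c rest hb hc hnl]
                simp only [List.foldl_cons, aStep, if_neg hb, if_neg hqt]
                simp only [hnl, Option.isSome_some, and_true, if_pos]
                simpa using this
              · have := ih.2 rest (out ++ [c]) qc h hq
                rw [bInner_other_ch qc c rest hb hc hnl]
                simp only [List.foldl_cons, aStep, if_neg hb, if_neg hqt]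
                simp only [hnl, false_and, if_neg, not_false_iff]
                simpa using this

-- ===== VERDICT (by name: the statement is the Claim_ definition above) =====
theorem sanitize_multiline_strings_py_spec : Claim_equal_sanitize_multiline_strings_py := by
  intro script _
  unfold Spec_sanitize_multiline_strings_py sanitize_multiline_strings_py sanitize_multiline_strings_py_alt
  have := (pv_main script.toList.length).1 script.toList [] (le_refl _)
  simp only [aFinish] at this
  simp [this]
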